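-- pv_equiv track=rewrite | github.com/pypi-data/pypi-mirror-55 | packages/numtmath/numtmath-1.6.0.1.tar.gz/numtmath-1.6.0.1/numtmath/numtmath.py | revtaxi
-- ===== SOURCE A (Python) =====
-- def revtaxi(n, am = 2, r = 2):
--
--     lastres = []
--     num = [1] * am
--     isRes = False
--
--     def raiseNumSystem(num, numToRaise):
--         num[numToRaise] += 1
--         for i in range(numToRaise + 1, am):
--             num[i] = num[numToRaise]
--
--         return num
--
--     numRaise = am - 1
--     while numRaise > -1:
--         res = 0
--         for i in range(am):
--             res += (num[i] ** r)
--
--         if res == n: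
--             lastres.append(num.copy())
--         if res > n:
--             numRaise -= 1
--         else:
--             numRaise = am - 1
--         num = raiseNumSystem(num, numRaise)
--
--     return lastres
-- ===== SOURCE B (Python) =====
-- def revtaxi(n, am = 2, r = 2):
--     # DFS over nondecreasing bases; the last base is found by an integer
--     # r-th root check instead of being enumerated.
--     if am < 1:
--         return []
--
--     def iroot(m):
--         # largest t >= 0 with t ** r <= m  (m >= 0), by binary search
--         lo, hi = 0, m
--         while lo < hi:
--             mid = (lo + hi + 1) // 2
--             if mid ** r <= m:
--                 lo = mid
--             else:
--                 hi = mid - 1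
--         return lo
--
--     out = []
--
--     def dfs(prefix, lo, rem, k):
--         if k == 1:
--             if rem >= 1:
--                 t = iroot(rem)
--                 if t >= lo and t ** r == rem:
--                     out.append(prefix + [t])
--             return
--         if rem < k:
--             return
--         b_hi = iroot(rem // k)
--         for b in range(lo, b_hi + 1):
--             dfs(prefix + [b], b, rem - b ** r, k - 1)
--
--     dfs([], 1, n, am)
--     return out
-- ===== Notes on version B (the rewrite author's own statement) =====
-- stated objective: faster
-- what changed: Replaces A's iterative odometer over all nondecreasing am-tuples by a recursive DFS over the first am-1 bases with divisibility-style pruning (k*b^r <= rem via an integer r-th root of rem//k) and determines the last base by a binary-search integer r-th root check instead of enumerating it.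
-- outside the precondition, e.g. on revtaxi(1, 2, 0): A returns [], B returns []
import Mathlib
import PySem

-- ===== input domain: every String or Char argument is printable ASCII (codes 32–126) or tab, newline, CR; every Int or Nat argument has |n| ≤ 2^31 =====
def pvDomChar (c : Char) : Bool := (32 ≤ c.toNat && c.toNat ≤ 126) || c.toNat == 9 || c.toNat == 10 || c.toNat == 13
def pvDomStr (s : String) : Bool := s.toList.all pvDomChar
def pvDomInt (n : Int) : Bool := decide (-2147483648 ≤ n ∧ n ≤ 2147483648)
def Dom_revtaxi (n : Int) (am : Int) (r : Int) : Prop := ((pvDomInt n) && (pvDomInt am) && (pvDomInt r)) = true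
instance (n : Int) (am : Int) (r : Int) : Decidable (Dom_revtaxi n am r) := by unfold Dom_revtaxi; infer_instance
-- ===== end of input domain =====

-- B replaces A's odometer loop over all nondecreasing am-tuples by a pruned DFS over the
-- first am-1 bases whose last base is found by an integer r-th root check (measured faster).
-- A's while-loop is ported with an explicit fuel bound (fuelA, proved sufficient under Pre_).

-- ===== PORT A =====

-- x ** r  (exact for r ≥ 0; Pre_ admits only 1 ≤ r)
def ipow (x : Int) (r : Int) : Int := x ^ r.toNat

-- literal port of A's inner helper raiseNumSystem (in-place list mutation rendered functionally;
-- pySetD/pyGetD carry Python's index semantics, incl. the negative index -1 the last call uses)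
def raiseNumSystem (am : Int) (num : List Int) (numToRaise : Int) : List Int :=
  let num1 := PySem.List.pySetD num numToRaise (PySem.List.pyGetD num numToRaise 0 + 1)
  (PySem.List.pyRange (numToRaise + 1) am 1).foldl
    (fun ns i => PySem.List.pySetD ns i (PySem.List.pyGetD ns numToRaise 0)) num1

-- res = 0; for i in range(am): res += num[i] ** r
def resOf (am : Int) (r : Int) (num : List Int) : Int :=
  (PySem.List.pyRange 0 am 1).foldl (fun res i => res + ipow (PySem.List.pyGetD num i 0) r) 0

-- the while-loop, with explicit fuel (the fuel is a guard making the loop total;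
-- fuelA below is proved sufficient for every input with 1 ≤ r)
def loopA (n : Int) (am : Int) (r : Int) : Nat → List Int → Int → List (List Int) → List (List Int)
  | 0, _, _, acc => acc
  | fuel + 1, num, numRaise, acc =>
    if numRaise > -1 then
      let res := resOf am r num
      let acc' := if res = n then acc ++ [num] else acc
      let numRaise' := if res > n then numRaise - 1 else am - 1
      loopA n am r fuel (raiseNumSystem am num numRaise') numRaise' acc'
    else acc

def fuelA (n : Int) (am : Int) : Nat := ((max n 1).toNat + 1) ^ am.toNat + 2

def revtaxi (n : Int) (am : Int) (r : Int) : List (List Int) :=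
  loopA n am r (fuelA n am) (List.replicate am.toNat 1) (am - 1) []

-- ===== PORT B =====

-- binary search of Source B's iroot: largest t in [lo, hi] with t ** r <= m (under the invariants)
-- mid = (lo + hi + 1) // 2 (inlined)
def irootAux (r : Int) (m : Int) (lo : Int) (hi : Int) : Int :=
  if h : lo < hi then
    if ipow (PySem.Int.floordiv (lo + hi + 1) 2) r ≤ m then
      irootAux r m (PySem.Int.floordiv (lo + hi + 1) 2) hi
    else irootAux r m lo (PySem.Int.floordiv (lo + hi + 1) 2 - 1)
  else lo
termination_by (hi - lo).toNat
decreasing_by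
  · have h2 : PySem.Int.floordiv (lo + hi + 1) 2 = (lo + hi + 1) / 2 :=
      PySem.Int.floordiv_eq_ediv_of_pos (by omega)
    simp only [h2]; omega
  · have h2 : PySem.Int.floordiv (lo + hi + 1) 2 = (lo + hi + 1) / 2 :=
      PySem.Int.floordiv_eq_ediv_of_pos (by omega)
    simp only [h2]; omega

def iroot (r : Int) (m : Int) : Int := irootAux r m 0 m

-- Source B's dfs: k bases still to place, all ≥ lo, remaining sum rem; the last base via iroot
def dfsB (r : Int) : Nat → List Int → Int → Int → List (List Int)
  | 0, _, _, _ => []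
  | 1, pre, lo, rem =>
    if 1 ≤ rem then
      let t := iroot r rem
      if lo ≤ t ∧ ipow t r = rem then [pre ++ [t]] else []
    else []
  | (k + 2), pre, lo, rem =>
    if rem < (k + 2 : Int) then []
    else
      (PySem.List.pyRange lo (iroot r (PySem.Int.floordiv rem (k + 2)) + 1) 1).flatMap
        (fun b => dfsB r (k + 1) (pre ++ [b]) b (rem - ipow b r))

def revtaxi_alt (n : Int) (am : Int) (r : Int) : List (List Int) :=
  if am < 1 then [] else dfsB r am.toNat [] 1 n


-- ===== PRECONDITION & SPEC =====
-- Pre_ excludes r ≤ 0: there Python's ** yields floats (r < 0) and A's loop diverges on most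
-- inputs (e.g. r = 0 with am ≤ n); on the r ≤ 0 inputs where A does terminate it returns [].
def Pre_revtaxi (n : Int) (am : Int) (r : Int) : Prop := 1 ≤ r
instance (n : Int) (am : Int) (r : Int) : Decidable (Pre_revtaxi n am r) := by
  unfold Pre_revtaxi; infer_instance

def pvWitness_revtaxi : Int × Int × Int := (1729, 2, 3)

def Spec_revtaxi (n : Int) (am : Int) (r : Int) (out : List (List Int)) : Prop := out = revtaxi_alt n am r
instance (n : Int) (am : Int) (r : Int) (out : List (List Int)) : Decidable (Spec_revtaxi n am r out) := by
  unfold Spec_revtaxi; infer_instance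

-- ===== CLAIM (what is proved, stated in full; the proofs are below) =====
def Claim_equal_revtaxi : Prop := ∀ (n : Int) (am : Int) (r : Int), Dom_revtaxi n am r → Pre_revtaxi n am r → Spec_revtaxi n am r (revtaxi n am r)

-- ===== LEMMAS AND PROOFS =====

def lexLeB : List Int → List Int → Bool
  | [], _ => true
  | _ :: _, [] => false
  | a :: as, b :: bs => decide (a < b) || (decide (a = b) && lexLeB as bs)

def lexLtB : List Int → List Int → Bool
  | [], [] => false
  | [], _ :: _ => true
  | _ :: _, [] => false
  | a :: as, b :: bs => decide (a < b) || (decide (a = b) && lexLtB as bs)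

theorem lexLeB_refl (a : List Int) : lexLeB a a = true := by
  induction a <;> simp [lexLeB, *]

theorem lexLeB_trans (a : List Int) : ∀ (b c : List Int),
    lexLeB a b = true → lexLeB b c = true → lexLeB a c = true := by
  induction a with
  | nil => intro b c _ _; simp [lexLeB]
  | cons x xs ih =>
    intro b c hab hbc
    cases b with
    | nil => simp [lexLeB] at hab
    | cons y ys =>
      cases c with
      | nil => simp [lexLeB] at hbc
      | cons z zs =>
        simp only [lexLeB, Bool.or_eq_true, Bool.and_eq_true, decide_eq_true_eq] at *
        rcases hab with h | ⟨rfl, h⟩ <;> rcases hbc with h' | ⟨rfl, h'⟩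
        · exact Or.inl (by omega)
        · exact Or.inl h
        · exact Or.inl h'
        · exact Or.inr ⟨rfl, ih _ _ h h'⟩

theorem lexLtB_le (a : List Int) : ∀ (b : List Int), lexLtB a b = true → lexLeB a b = true := by
  induction a with
  | nil => intro b _; simp [lexLeB]
  | cons x xs ih =>
    intro b h
    cases b with
    | nil => simp [lexLtB] at h
    | cons y ys =>
      simp only [lexLtB, lexLeB, Bool.or_eq_true, Bool.and_eq_true, decide_eq_true_eq] at *
      rcases h with h | ⟨rfl, h⟩
      · exact Or.inl h
      · exact Or.inr ⟨rfl, ih _ h⟩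

theorem lexLtB_not_le (a : List Int) : ∀ (b : List Int), lexLtB a b = true → lexLeB b a = false := by
  induction a with
  | nil =>
    intro b h
    cases b with
    | nil => simp [lexLtB] at h
    | cons y ys => simp [lexLeB]
  | cons x xs ih =>
    intro b h
    cases b with
    | nil => simp [lexLtB] at h
    | cons y ys =>
      simp only [lexLtB, Bool.or_eq_true, Bool.and_eq_true, decide_eq_true_eq] at h
      simp only [lexLeB, Bool.or_eq_false_iff, Bool.and_eq_false_iff,
        decide_eq_false_iff_not, not_lt]
      rcases h with h | ⟨rfl, h⟩
      · exact ⟨by omega, Or.inl (by omega)⟩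
      · exact ⟨le_refl _, Or.inr (ih _ h)⟩

theorem lexLt_of_not_le (a : List Int) : ∀ (b : List Int), lexLeB a b = false → lexLtB b a = true := by
  induction a with
  | nil => intro b h; simp [lexLeB] at h
  | cons x xs ih =>
    intro b h
    cases b with
    | nil => simp [lexLtB]
    | cons y ys =>
      simp only [lexLeB, Bool.or_eq_false_iff, Bool.and_eq_false_iff,
        decide_eq_false_iff_not, not_lt] at h
      simp only [lexLtB, Bool.or_eq_true, Bool.and_eq_true, decide_eq_true_eq]
      rcases h with ⟨h1, h2 | h2⟩
      · exact Or.inl (by omega)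
      · by_cases hxy : x = y
        · subst hxy; exact Or.inr ⟨rfl, ih _ h2⟩
        · exact Or.inl (by omega)

theorem lexLt_of_lt_of_le (a : List Int) : ∀ (b c : List Int),
    lexLtB a b = true → lexLeB b c = true → lexLtB a c = true := by
  induction a with
  | nil =>
    intro b c hab hbc
    cases b with
    | nil => simp [lexLtB] at hab
    | cons y ys =>
      cases c with
      | nil => simp [lexLeB] at hbc
      | cons z zs => simp [lexLtB]
  | cons x xs ih =>
    intro b c hab hbc
    cases b with
    | nil => simp [lexLtB] at hab
    | cons y ys =>
      cases c with
      | nil => simp [lexLeB] at hbc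
      | cons z zs =>
        simp only [lexLtB, lexLeB, Bool.or_eq_true, Bool.and_eq_true, decide_eq_true_eq] at *
        rcases hab with h | ⟨rfl, h⟩ <;> rcases hbc with h' | ⟨rfl, h'⟩
        · exact Or.inl (by omega)
        · exact Or.inl h
        · exact Or.inl h'
        · exact Or.inr ⟨rfl, ih _ _ h h'⟩

theorem lexLt_append_lt (p : List Int) (x y : Int) (u w : List Int) (h : x < y) :
    lexLtB (p ++ x :: u) (p ++ y :: w) = true := by
  induction p with
  | nil => simp [lexLtB, h]
  | cons a p ih =>
    simp [List.cons_append, lexLtB, ih]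

theorem lexLe_succ_last (p : List Int) : ∀ (x : Int) (t : List Int), t.length = p.length + 1 →
    lexLeB (p ++ [x]) t = true → t ≠ p ++ [x] → lexLeB (p ++ [x + 1]) t = true := by
  induction p with
  | nil =>
    intro x t hlen hle hne
    cases t with
    | nil => simp at hlen
    | cons t0 ts =>
      have hts : ts = [] := by simpa using hlen
      subst hts
      simp only [List.nil_append, lexLeB, Bool.or_eq_true, Bool.and_eq_true,
        decide_eq_true_eq] at hle ⊢
      rcases hle with h | ⟨rfl, h⟩
      · by_cases hx : x + 1 = t0
        · exact Or.inr ⟨hx, trivial⟩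
        · exact Or.inl (by omega)
      · exact absurd rfl hne
  | cons p0 p ih =>
    intro x t hlen hle hne
    cases t with
    | nil => simp [lexLeB] at hle
    | cons t0 ts =>
      simp only [List.cons_append, lexLeB, Bool.or_eq_true, Bool.and_eq_true,
        decide_eq_true_eq] at hle ⊢
      rcases hle with h | ⟨rfl, h⟩
      · exact Or.inl h
      · refine Or.inr ⟨rfl, ih x ts (by simpa using hlen) h ?_⟩
        intro hh; exact hne (by simp [hh])

theorem chain_le_of_chain (t : List Int) : ∀ (c : Int), List.IsChain (· ≤ ·) (c :: t) → ∀ x ∈ t, c ≤ x := by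
  induction t with
  | nil => intro c _ x hx; simp at hx
  | cons a t ih =>
    intro c h x hx
    rcases List.isChain_cons_cons.mp h with ⟨hca, ht⟩
    rcases List.mem_cons.mp hx with rfl | hx'
    · exact hca
    · exact le_trans hca (ih a ht x hx')

theorem lexLe_replicate_of_chain (t : List Int) : ∀ (w : Int), List.IsChain (· ≤ ·) (w :: t) →
    lexLeB (List.replicate t.length w) t = true := by
  induction t with
  | nil => intro w _; simp [lexLeB]
  | cons a t ih =>
    intro w h
    rcases List.isChain_cons_cons.mp h with ⟨hwa, ht⟩
    simp only [List.length_cons, List.replicate_succ, lexLeB, Bool.or_eq_true,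
      Bool.and_eq_true, decide_eq_true_eq]
    rcases lt_or_eq_of_le hwa with hlt | rfl
    · exact Or.inl hlt
    · exact Or.inr ⟨rfl, ih w ht⟩

theorem forall2_replicate_of_chain (t : List Int) : ∀ (w v : Int), List.IsChain (· ≤ ·) (w :: t) → v ≤ w →
    List.Forall₂ (· ≤ ·) (List.replicate t.length v) t := by
  induction t with
  | nil => intro w v _ _; simp
  | cons a t ih =>
    intro w v h hvw
    rcases List.isChain_cons_cons.mp h with ⟨hwa, ht⟩
    simp only [List.length_cons, List.replicate_succ]
    exact List.Forall₂.cons (by omega) (ih a v ht (by omega))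

theorem lemA (k : Nat) : ∀ (v : Int) (t : List Int), lexLeB (List.replicate k v) t = true →
    List.IsChain (· ≤ ·) t → t.length = k → List.Forall₂ (· ≤ ·) (List.replicate k v) t := by
  induction k with
  | zero => intro v t _ _ hl; simp_all
  | succ k ih =>
    intro v t hle hch hl
    rcases t with _ | ⟨a, t⟩
    · simp at hl
    · simp only [List.replicate_succ, lexLeB, Bool.or_eq_true, Bool.and_eq_true,
        decide_eq_true_eq] at hle
      have hlt : t.length = k := by simpa using hl
      rcases hle with h | ⟨rfl, h⟩
      · refine List.Forall₂.cons (le_of_lt h) ?_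
        rw [← hlt]
        exact forall2_replicate_of_chain t a v hch (le_of_lt h)
      · exact List.Forall₂.cons (le_refl _) (ih v t h hch.tail hlt)

-- backtrack case: num ≤lex t <lex raised ⇒ pointwise num ≤ t
theorem lemC (q₀ : List Int) : ∀ (a v : Int) (k : Nat) (t : List Int),
    t.length = q₀.length + 1 + k → List.IsChain (· ≤ ·) t →
    lexLeB (q₀ ++ a :: List.replicate k v) t = true →
    lexLtB t (q₀ ++ (a + 1) :: List.replicate k (a + 1)) = true →
    List.Forall₂ (· ≤ ·) (q₀ ++ a :: List.replicate k v) t := by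
  induction q₀ with
  | nil =>
    intro a v k t hlen hch hle hlt
    cases t with
    | nil => exact absurd hlen (by simp; omega)
    | cons t0 ts =>
      have hts : ts.length = k := by simp at hlen; omega
      simp only [List.nil_append, lexLeB, lexLtB, Bool.or_eq_true, Bool.and_eq_true,
        decide_eq_true_eq] at hle hlt
      rcases hle with h | ⟨rfl, h⟩
      · rcases hlt with h' | ⟨rfl, h'⟩
        · omega
        · exfalso
          have hrep : lexLeB (List.replicate ts.length (a + 1)) ts = true :=
            lexLe_replicate_of_chain ts (a + 1) hch
          rw [hts] at hrep
          exact absurd hrep (by simpa using lexLtB_not_le ts _ h')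
      · exact List.Forall₂.cons (le_refl _) (lemA k v ts h hch.tail hts)
  | cons p0 q₀ ih =>
    intro a v k t hlen hch hle hlt
    cases t with
    | nil => simp [lexLeB] at hle
    | cons t0 ts =>
      simp only [List.cons_append, lexLeB, lexLtB, Bool.or_eq_true, Bool.and_eq_true,
        decide_eq_true_eq] at hle hlt
      rcases hle with h | ⟨rfl, h⟩ <;> rcases hlt with h' | h'
      · omega
      · omega
      · omega
      · exact List.Forall₂.cons (le_refl _)
          (ih a v k ts (by simp at hlen ⊢; omega) hch.tail h h'.2)

def sumPow (r : Int) (t : List Int) : Int := (t.map (fun x => ipow x r)).sum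

theorem one_le_ipow (x : Int) (r : Int) (h : 1 ≤ x) : 1 ≤ ipow x r := one_le_pow₀ h

theorem self_le_ipow (x : Int) (r : Int) (hx : 1 ≤ x) (hr : 1 ≤ r) : x ≤ ipow x r := by
  have : r.toNat ≠ 0 := by omega
  exact le_self_pow₀ hx this

theorem ipow_le_ipow (a b : Int) (r : Int) (ha : 0 ≤ a) (hab : a ≤ b) : ipow a r ≤ ipow b r :=
  pow_le_pow_left₀ ha hab r.toNat

theorem ipow_lt_ipow (a b : Int) (r : Int) (ha : 0 ≤ a) (hab : a < b) (hr : 1 ≤ r) :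
    ipow a r < ipow b r := by
  have : r.toNat ≠ 0 := by omega
  exact pow_lt_pow_left₀ hab ha this

theorem sumPow_le_of_forall2 (r : Int) (u t : List Int) (h : List.Forall₂ (· ≤ ·) u t)
    (hu : ∀ x ∈ u, 0 ≤ x) : sumPow r u ≤ sumPow r t := by
  induction h with
  | nil => simp [sumPow]
  | @cons a b u' t' hab htl ih =>
    simp only [sumPow, List.map_cons, List.sum_cons] at *
    have h1 : ipow a r ≤ ipow b r := ipow_le_ipow a b r (hu a (by simp)) hab
    have h2 := ih (fun x hx => hu x (by simp [hx]))
    omega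

theorem entry_le_of_sumPow_le (r : Int) (u : List Int) (n : Int) (hr : 1 ≤ r)
    (hch : List.IsChain (· ≤ ·) (1 :: u)) (hs : sumPow r u ≤ n) : ∀ x ∈ u, x ≤ n := by
  intro x hx
  have h1 : 1 ≤ x := chain_le_of_chain u 1 hch x hx
  have h2 : x ≤ ipow x r := self_le_ipow x r h1 hr
  have h3 : ipow x r ≤ sumPow r u := by
    apply List.single_le_sum (l := u.map (fun x => ipow x r))
    · intro y hy
      rcases List.mem_map.mp hy with ⟨z, hz, rfl⟩
      have : 1 ≤ z := chain_le_of_chain u 1 hch z hz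
      have := one_le_ipow z r this
      omega
    · exact List.mem_map.mpr ⟨x, hx, rfl⟩
  omega

theorem sumPow_ge_len_mul (r : Int) (t : List Int) (b : Int) (hb : 0 ≤ b)
    (h : ∀ x ∈ t, b ≤ x) : (t.length : Int) * ipow b r ≤ sumPow r t := by
  induction t with
  | nil => simp [sumPow]
  | cons a t ih =>
    have h1 : ipow b r ≤ ipow a r := ipow_le_ipow b a r hb (h a (by simp))
    have h2 := ih (fun x hx => h x (by simp [hx]))
    simp only [sumPow, List.map_cons, List.sum_cons, List.length_cons] at *
    push_cast
    nlinarith [h1, h2]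

-- all nondecreasing k-tuples with entries in [lo, hi], in lexicographic order
def ndT (lo : Int) (k : Nat) (hi : Int) : List (List Int) :=
  match k with
  | 0 => [[]]
  | k + 1 => (PySem.List.pyRange lo (hi + 1) 1).flatMap (fun b => (ndT b k hi).map (fun t => b :: t))

theorem mem_ndT (k : Nat) : ∀ (lo hi : Int) (t : List Int),
    t ∈ ndT lo k hi ↔ t.length = k ∧ List.IsChain (· ≤ ·) (lo :: t) ∧ ∀ x ∈ t, x ≤ hi := by
  induction k with
  | zero =>
    intro lo hi t
    simp only [ndT, List.mem_singleton]
    constructor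
    · rintro rfl; simp
    · rintro ⟨h, -, -⟩; exact List.length_eq_zero_iff.mp h
  | succ k ih =>
    intro lo hi t
    simp only [ndT, List.mem_flatMap, List.mem_map, PySem.List.mem_pyRange_one]
    constructor
    · rintro ⟨b, ⟨hlb, hbh⟩, s, hs, rfl⟩
      rcases (ih b hi s).mp hs with ⟨hlen, hch, hbd⟩
      refine ⟨by simp [hlen], ?_, ?_⟩
      · exact List.isChain_cons_cons.mpr ⟨hlb, hch⟩
      · intro x hx
        rcases List.mem_cons.mp hx with rfl | hx'
        · omega
        · exact hbd x hx'
    · rintro ⟨hlen, hch, hbd⟩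
      cases t with
      | nil => simp at hlen
      | cons b s =>
        rcases List.isChain_cons_cons.mp hch with ⟨hlb, hch'⟩
        refine ⟨b, ⟨hlb, by have := hbd b (by simp); omega⟩, s, ?_, rfl⟩
        exact (ih b hi s).mpr ⟨by simpa using hlen, hch', fun x hx => hbd x (by simp [hx])⟩

theorem pairwise_flatMap_lex {α : Type} (f : α → List (List Int))
    (S : α → α → Prop)
    (h3 : ∀ a b, S a b → ∀ x ∈ f a, ∀ y ∈ f b, lexLtB x y = true) :
    ∀ (bs : List α), bs.Pairwise S →
    (∀ b ∈ bs, (f b).Pairwise (fun s t => lexLtB s t = true)) →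
    (bs.flatMap f).Pairwise (fun s t => lexLtB s t = true) := by
  intro bs
  induction bs with
  | nil => simp
  | cons b bs ih =>
    intro h1 h2
    rcases List.pairwise_cons.mp h1 with ⟨hb, hbs⟩
    simp only [List.flatMap_cons]
    rw [List.pairwise_append]
    refine ⟨h2 b (by simp), ih hbs (fun c hc => h2 c (by simp [hc])), ?_⟩
    intro x hx y hy
    rcases List.mem_flatMap.mp hy with ⟨c, hc, hyc⟩
    exact h3 b c (hb c hc) x hx y hyc

theorem ndT_pairwise (k : Nat) : ∀ (lo hi : Int),
    (ndT lo k hi).Pairwise (fun s t => lexLtB s t = true) := by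
  induction k with
  | zero => intro lo hi; simp [ndT]
  | succ k ih =>
    intro lo hi
    apply pairwise_flatMap_lex _ (· < ·)
    · intro a b hab x hx y hy
      rcases List.mem_map.mp hx with ⟨s, _, rfl⟩
      rcases List.mem_map.mp hy with ⟨t, _, rfl⟩
      simp [lexLtB, hab]
    · exact PySem.List.pairwise_lt_pyRange_one lo (hi + 1)
    · intro b _
      apply List.Pairwise.map
      · intro s t hst
        simpa [lexLtB] using hst
      · exact ih b hi

theorem ndT_length_le (k : Nat) : ∀ (lo hi : Int), (ndT lo k hi).length ≤ ((hi + 1 - lo).toNat) ^ k := by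
  induction k with
  | zero => intro lo hi; simp [ndT]
  | succ k ih =>
    intro lo hi
    simp only [ndT, List.length_flatMap]
    have hb : ∀ x ∈ (PySem.List.pyRange lo (hi + 1) 1).map
        (fun b => ((ndT b k hi).map (fun t => b :: t)).length), x ≤ ((hi + 1 - lo).toNat) ^ k := by
      intro x hx
      rcases List.mem_map.mp hx with ⟨b, hbm, rfl⟩
      rcases PySem.List.mem_pyRange_one.mp hbm with ⟨hlb, hbh⟩
      simp only [List.length_map]
      calc (ndT b k hi).length ≤ ((hi + 1 - b).toNat) ^ k := ih b hi
        _ ≤ ((hi + 1 - lo).toNat) ^ k := Nat.pow_le_pow_left (by omega) k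
    calc ((PySem.List.pyRange lo (hi + 1) 1).map
          (fun b => ((ndT b k hi).map (fun t => b :: t)).length)).sum
        ≤ ((PySem.List.pyRange lo (hi + 1) 1).map
          (fun b => ((ndT b k hi).map (fun t => b :: t)).length)).length • ((hi + 1 - lo).toNat) ^ k :=
          List.sum_le_card_nsmul _ _ hb
      _ ≤ ((hi + 1 - lo).toNat) ^ (k + 1) := by
          simp only [List.length_map, PySem.List.length_pyRange_one, smul_eq_mul, pow_succ]
          exact le_of_eq (by ring)

theorem lexLtB_irrefl (a : List Int) : lexLtB a a = false := by
  by_contra h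
  have h' : lexLtB a a = true := by revert h; cases lexLtB a a <;> simp
  have := lexLtB_not_le a a h'
  rw [lexLeB_refl] at this
  cases this

theorem filter_split (num : List Int) (c : Bool) (p q : List Int → Bool)
    (hpc : p num = c) (hqnum : q num = false) :
    ∀ (E : List (List Int)), E.Pairwise (fun s t => lexLtB s t = true) → num ∈ E →
    (∀ t ∈ E, t ≠ num → p t = q t) → (∀ t ∈ E, q t = true → lexLtB num t = true) →
    E.filter p = (if c then [num] else []) ++ E.filter q := by
  intro E
  induction E with
  | nil => intro _ hmem; simp at hmem
  | cons h tl ih =>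
    intro hpw hmem hiff hqgt
    rcases List.pairwise_cons.mp hpw with ⟨hh, htl⟩
    by_cases heq : h = num
    · subst heq
      have h1 : tl.filter p = tl.filter q := by
        apply List.filter_congr
        intro t ht
        have hlt := hh t ht
        have : t ≠ h := by
          intro hth; subst hth; rw [lexLtB_irrefl] at hlt; cases hlt
        exact hiff t (by simp [ht]) (by intro hc; exact this (by rw [hc]))
      rw [List.filter_cons, List.filter_cons, hpc, hqnum, h1]
      cases c <;> simp
    · have hmem' : num ∈ tl := by
        rcases List.mem_cons.mp hmem with h' | h'
        · exact absurd h'.symm heq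
        · exact h'
      have hqh : q h = false := by
        by_contra hq
        have hq' : q h = true := by revert hq; cases q h <;> simp
        have h1 := hqgt h (by simp) hq'
        have h2 := hh num hmem'
        have := lexLt_of_lt_of_le h num h h2 (lexLtB_le _ _ h1)
        rw [lexLtB_irrefl] at this; cases this
      have hph : p h = false := by rw [hiff h (by simp) heq, hqh]
      rw [List.filter_cons, List.filter_cons, hph, hqh]
      simp only [Bool.false_eq_true, if_false]
      exact ih htl hmem' (fun t ht hne => hiff t (by simp [ht]) hne)
        (fun t ht hq => hqgt t (by simp [ht]) hq)

theorem countP_lt_of (num : List Int) (p q : List Int → Bool)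
    (himp : ∀ t, p t = true → q t = true) (hpn : p num = false) (hqn : q num = true) :
    ∀ (E : List (List Int)), num ∈ E → E.countP p < E.countP q := by
  intro E
  induction E with
  | nil => intro hmem; simp at hmem
  | cons h tl ih =>
    intro hmem
    rw [List.countP_cons, List.countP_cons]
    by_cases heq : h = num
    · subst heq
      have h1 : tl.countP p ≤ tl.countP q := List.countP_mono_left (fun x _ => himp x)
      rw [hpn, hqn]; simp; omega
    · have hmem' : num ∈ tl := by
        rcases List.mem_cons.mp hmem with h' | h'
        · exact absurd h'.symm heq
        · exact h'
      have h1 := ih hmem'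
      have h2 : (if p h = true then 1 else 0) ≤ (if q h = true then 1 else 0) := by
        by_cases hp : p h = true
        · rw [if_pos hp, if_pos (himp h hp)]
        · rw [if_neg hp]; omega
      omega

-- res = sum of num[i] ** r
theorem resOf_eq (am r : Int) (num : List Int) (h : (num.length : Int) = am) :
    resOf am r num = sumPow r num := by
  unfold resOf
  rw [← h]
  rw [PySem.List.foldl_pyRange_zero_pyGetD' num 0 (fun acc x => acc + ipow x r) 0]
  rw [PySem.List.foldl_add num (fun x => ipow x r) 0]
  simp [sumPow]

theorem getD_mid (p : List Int) (y : Int) (l : List Int) : (p ++ y :: l).getD p.length 0 = y := by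
  induction p with
  | nil => rfl
  | cons a p ih => simpa using ih

theorem set_at (p : List Int) (x : Int) (s : List Int) (v : Int) :
    (p ++ x :: s).set p.length v = p ++ v :: s := by
  induction p with
  | nil => rfl
  | cons a p ih => simpa using ih

theorem set_mid (p : List Int) (y : Int) (mid : List Int) (z : Int) (s : List Int) (v : Int) :
    (p ++ y :: (mid ++ z :: s)).set (p.length + 1 + mid.length) v = p ++ y :: (mid ++ v :: s) := by
  induction p with
  | nil =>
    simp only [List.nil_append, List.length_nil]
    rw [show 0 + 1 + mid.length = mid.length + 1 from by omega, List.set_cons_succ, set_at]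
  | cons a p ih => simpa [Nat.add_right_comm] using ih

theorem raise_fold_aux : ∀ (s₂ mid p : List Int) (x : Int),
    (PySem.List.pyRange ((p.length : Int) + 1 + (mid.length : Int))
        ((p.length : Int) + 1 + (mid.length : Int) + (s₂.length : Int)) 1).foldl
      (fun ns i => PySem.List.pySetD ns i (PySem.List.pyGetD ns ((p.length : Nat) : Int) 0))
      (p ++ (x + 1) :: (mid ++ s₂))
    = p ++ (x + 1) :: (mid ++ List.replicate s₂.length (x + 1)) := by
  intro s₂
  induction s₂ with
  | nil =>
    intro mid p x
    rw [PySem.List.pyRange_one_eq_nil (by simp)]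
    simp
  | cons z s₂ ih =>
    intro mid p x
    rw [PySem.List.pyRange_one_cons (by simp only [List.length_cons]; push_cast; omega)]
    simp only [List.foldl_cons]
    have hget : PySem.List.pyGetD (p ++ (x + 1) :: (mid ++ z :: s₂)) ((p.length : Nat) : Int) 0
        = x + 1 := by
      rw [PySem.List.pyGetD_natCast, getD_mid]
    rw [hget]
    have hset : PySem.List.pySetD (p ++ (x + 1) :: (mid ++ z :: s₂))
        ((p.length : Int) + 1 + (mid.length : Int)) (x + 1)
        = p ++ (x + 1) :: (mid ++ (x + 1) :: s₂) := by
      have hcast : ((p.length : Int) + 1 + (mid.length : Int))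
          = ((p.length + 1 + mid.length : Nat) : Int) := by push_cast; ring
      rw [hcast, PySem.List.pySetD_natCast, set_mid]
    rw [hset]
    have hrange : PySem.List.pyRange ((p.length : Int) + 1 + (mid.length : Int) + 1)
          ((p.length : Int) + 1 + (mid.length : Int) + ((z :: s₂).length : Int)) 1
        = PySem.List.pyRange ((p.length : Int) + 1 + (((mid ++ [x + 1]).length : Nat) : Int))
          ((p.length : Int) + 1 + (((mid ++ [x + 1]).length : Nat) : Int) + (s₂.length : Int)) 1 := by
      congr 1 <;> (simp; omega)
    have hlist : p ++ (x + 1) :: (mid ++ (x + 1) :: s₂)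
        = p ++ (x + 1) :: ((mid ++ [x + 1]) ++ s₂) := by simp
    rw [hrange, hlist, ih (mid ++ [x + 1]) p x]
    simp [List.replicate_succ]

theorem raise_eq (p : List Int) (x : Int) (s : List Int) (am : Int)
    (ham : am = (p.length : Int) + 1 + (s.length : Int)) :
    raiseNumSystem am (p ++ x :: s) ((p.length : Nat) : Int)
      = p ++ (x + 1) :: List.replicate s.length (x + 1) := by
  unfold raiseNumSystem
  have hget : PySem.List.pyGetD (p ++ x :: s) ((p.length : Nat) : Int) 0 = x := by
    rw [PySem.List.pyGetD_natCast, getD_mid]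
  have hset : PySem.List.pySetD (p ++ x :: s) ((p.length : Nat) : Int) (x + 1)
      = p ++ (x + 1) :: s := by
    rw [PySem.List.pySetD_natCast, set_at]
  rw [hget, hset]
  have := raise_fold_aux s [] p x
  simp only [List.length_nil, List.nil_append, Nat.cast_zero, add_zero] at this
  rw [ham]
  convert this using 3

theorem chain_replicate (w : Int) (k : Nat) : List.IsChain (· ≤ ·) (w :: List.replicate k w) := by
  induction k with
  | zero => simp
  | succ k ih => simpa [List.replicate_succ] using List.isChain_cons_cons.mpr ⟨le_refl w, ih⟩

theorem chain_snoc_mono (c x y : Int) (p : List Int) (hxy : x ≤ y)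
    (h : List.IsChain (· ≤ ·) (c :: (p ++ [x]))) : List.IsChain (· ≤ ·) (c :: (p ++ [y])) := by
  have h' : List.IsChain (· ≤ ·) ((c :: p) ++ [x]) := by simpa using h
  rcases List.isChain_append.mp h' with ⟨h1, h2, h3⟩
  have : List.IsChain (· ≤ ·) ((c :: p) ++ [y]) := by
    refine List.isChain_append.mpr ⟨h1, by simp, ?_⟩
    intro u hu w hw
    simp only [List.head?_cons, Option.mem_def, Option.some.injEq] at hw
    subst hw
    exact le_trans (h3 u hu x (by simp)) hxy
  simpa using this

theorem chain_raise (q₀ : List Int) (a v : Int) (k : Nat)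
    (h : List.IsChain (· ≤ ·) (1 :: (q₀ ++ a :: List.replicate k v))) :
    List.IsChain (· ≤ ·) (1 :: (q₀ ++ (a + 1) :: List.replicate k (a + 1))) := by
  have h' : List.IsChain (· ≤ ·) ((1 :: q₀) ++ (a :: List.replicate k v)) := by simpa using h
  rcases List.isChain_append.mp h' with ⟨h1, h2, h3⟩
  have : List.IsChain (· ≤ ·) ((1 :: q₀) ++ ((a + 1) :: List.replicate k (a + 1))) := by
    refine List.isChain_append.mpr ⟨h1, chain_replicate (a + 1) k, ?_⟩
    intro u hu w hw
    simp only [List.head?_cons, Option.mem_def, Option.some.injEq] at hw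
    subst hw
    exact le_trans (h3 u hu a (by simp)) (by omega)
  simpa using this

theorem loopA_eq (n am r M : Int) (hr : 1 ≤ r) (hM : M = max n 1 + 1) :
    ∀ (fuel : Nat) (q : List Int) (v : Int) (k : Nat) (acc : List (List Int)),
    1 ≤ k →
    ((q.length + k : Nat) : Int) = am →
    List.IsChain (· ≤ ·) (1 :: (q ++ List.replicate k v)) →
    (∀ x ∈ q, x ≤ M - 1) → v ≤ M →
    (ndT 1 am.toNat M).countP (fun t => lexLeB (q ++ List.replicate k v) t) + 2 ≤ fuel →
    loopA n am r fuel (q ++ List.replicate k v) ((q.length : Nat) : Int) acc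
      = acc ++ (ndT 1 am.toNat M).filter
          (fun t => lexLeB (q ++ List.replicate k v) t && (sumPow r t == n)) := by
  intro fuel
  induction fuel with
  | zero => intro q v k acc _ _ _ _ _ hf; omega
  | succ fuel ih =>
    intro q v k acc hk hlen hch hq hv hf
    have hM2 : 2 ≤ M := by omega
    have hamNat : am.toNat = q.length + k := by omega
    set num := q ++ List.replicate k v with hnum
    have hlenN : num.length = am.toNat := by simp [hnum, hamNat]
    have hlenI : (num.length : Int) = am := by rw [hlenN]; omega
    have hone : ∀ x ∈ num, 1 ≤ x := chain_le_of_chain num 1 hch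
    have hbound : ∀ x ∈ num, x ≤ M := by
      intro x hx
      rcases List.mem_append.mp hx with hx' | hx'
      · have := hq x hx'; omega
      · have := List.eq_of_mem_replicate hx'; omega
    have hnum_mem : num ∈ ndT 1 am.toNat M :=
      (mem_ndT am.toNat 1 M num).mpr ⟨hlenN, hch, hbound⟩
    have hsorted := ndT_pairwise am.toNat 1 M
    have hvmem : v ∈ num := by
      apply List.mem_append_right
      exact List.mem_replicate.mpr ⟨by omega, rfl⟩
    simp only [loopA]
    rw [if_pos (by omega : ((q.length : Nat) : Int) > -1)]
    rw [resOf_eq am r num hlenI]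
    by_cases hres : sumPow r num > n
    · rw [if_neg (by omega : ¬ sumPow r num = n), if_pos hres]
      rcases List.eq_nil_or_concat q with rfl | ⟨q₀, a, rfl⟩
      · -- numRaise becomes -1: the loop exits on the next iteration; no solutions remain
        have hnumr : num = List.replicate k v := by simp [hnum]
        have hfilter : (ndT 1 am.toNat M).filter
            (fun t => lexLeB num t && (sumPow r t == n)) = [] := by
          rw [List.filter_eq_nil_iff]
          intro t ht hb
          have hb' : lexLeB num t = true ∧ (sumPow r t == n) = true := by simpa using hb
          rcases hb' with ⟨hle, hsol⟩
          rcases (mem_ndT am.toNat 1 M t).mp ht with ⟨htl, htch, _⟩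
          have htk : t.length = k := by simp [hamNat] at htl; omega
          have hf2 : List.Forall₂ (· ≤ ·) (List.replicate k v) t :=
            lemA k v t (by rw [hnumr] at hle; exact hle) htch.tail htk
          have hsum : sumPow r (List.replicate k v) ≤ sumPow r t :=
            sumPow_le_of_forall2 r _ t hf2
              (fun x hx => by have := hone x (by rw [hnumr]; exact hx); omega)
          have hsol' : sumPow r t = n := by simpa using hsol
          rw [hnumr] at hres
          omega
        rw [hfilter, List.append_nil]
        have hfuel1 : 1 ≤ fuel := by omega
        rcases fuel with _ | fuel'
        · omega
        · simp [loopA]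
      · -- backtrack: raise position |q₀|
        simp only [List.concat_eq_append] at *
        have hnum_eq : num = q₀ ++ a :: List.replicate k v := by
          simp [hnum, List.append_assoc]
        have hnrcast : ((((q₀ ++ [a]).length : Nat)) : Int) - 1 = ((q₀.length : Nat) : Int) := by
          simp only [List.length_append, List.length_cons, List.length_nil]
          push_cast
          omega
        rw [hnrcast]
        have hraise : raiseNumSystem am num ((q₀.length : Nat) : Int)
            = q₀ ++ (a + 1) :: List.replicate k (a + 1) := by
          rw [hnum_eq]
          have := raise_eq q₀ a (List.replicate k v) am (by simp; omega)
          simpa using this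
        rw [hraise]
        have hnum2 : q₀ ++ (a + 1) :: List.replicate k (a + 1)
            = q₀ ++ List.replicate (k + 1) (a + 1) := by
          simp [List.replicate_succ]
        have hamem : a ∈ q₀ ++ [a] := by simp
        have hlt12 : lexLtB num (q₀ ++ (a + 1) :: List.replicate k (a + 1)) = true := by
          rw [hnum_eq]
          exact lexLt_append_lt q₀ a (a + 1) _ _ (by omega)
        have hle12 : lexLeB num (q₀ ++ (a + 1) :: List.replicate k (a + 1)) = true :=
          lexLtB_le _ _ hlt12
        have hcount : (ndT 1 am.toNat M).countP
              (fun t => lexLeB (q₀ ++ List.replicate (k + 1) (a + 1)) t)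
            < (ndT 1 am.toNat M).countP (fun t => lexLeB num t) := by
          apply countP_lt_of num _ _ ?_ ?_ (lexLeB_refl num) _ hnum_mem
          · intro t ht
            rw [← hnum2] at ht
            exact lexLeB_trans num _ t hle12 ht
          · rw [← hnum2]
            exact lexLtB_not_le num _ hlt12
        rw [hnum2]
        rw [ih q₀ (a + 1) (k + 1) acc (by omega) (by simp at hlen ⊢; omega)
          (by rw [← hnum2]; exact chain_raise q₀ a v k (by rw [← hnum_eq]; exact hch))
          (fun x hx => hq x (by simp [hx])) (by have := hq a hamem; omega)
          (by omega)]
        congr 1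
        apply List.filter_congr
        intro t ht
        rcases (mem_ndT am.toNat 1 M t).mp ht with ⟨htl, htch, _⟩
        cases hsol : (sumPow r t == n) with
        | false => simp
        | true =>
          simp only [Bool.and_true]
          have hsol' : sumPow r t = n := by simpa using hsol
          cases hle : lexLeB num t with
          | true =>
            -- t is a solution ≥ num; show it is ≥ the raised tuple
            cases hle2 : lexLeB (q₀ ++ List.replicate (k + 1) (a + 1)) t with
            | true => rfl
            | false =>
              exfalso
              have hltt : lexLtB t (q₀ ++ List.replicate (k + 1) (a + 1)) = true :=
                lexLt_of_not_le _ t hle2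
              rw [← hnum2] at hltt
              have hf2 : List.Forall₂ (· ≤ ·) (q₀ ++ a :: List.replicate k v) t := by
                apply lemC q₀ a v k t ?_ htch.tail ?_ hltt
                · simp at hlen; omega
                · rw [← hnum_eq]; exact hle
              have hsum : sumPow r num ≤ sumPow r t := by
                rw [hnum_eq]
                exact sumPow_le_of_forall2 r _ t hf2
                  (fun x hx => by have := hone x (by rw [hnum_eq]; exact hx); omega)
              omega
          | false =>
            cases hle2 : lexLeB (q₀ ++ List.replicate (k + 1) (a + 1)) t with
            | false => rfl
            | true =>
              exfalso
              have : lexLeB num t = true := by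
                apply lexLeB_trans num _ t ?_ hle2
                rw [← hnum2]; exact hle12
              rw [hle] at this; cases this
    · -- res ≤ n: append if solution, reset numRaise to am - 1
      rw [if_neg (by omega : ¬ sumPow r num > n)]
      have hentry : ∀ x ∈ num, x ≤ n := entry_le_of_sumPow_le r num n hr hch (by omega)
      have hvn : v ≤ n := hentry v hvmem
      -- num = p ++ [v] with p = q ++ replicate (k-1) v
      obtain ⟨k', rfl⟩ : ∃ k', k = k' + 1 := ⟨k - 1, by omega⟩
      set p := q ++ List.replicate k' v with hp
      have hnum_eq : num = p ++ [v] := by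
        simp [hnum, hp, List.replicate_succ', List.append_assoc]
      have hnrcast : (am - 1) = ((p.length : Nat) : Int) := by
        simp [hp]; simp at hlen; omega
      have hraise : raiseNumSystem am num (am - 1) = p ++ [v + 1] := by
        rw [hnrcast, hnum_eq]
        have := raise_eq p v [] am (by simp [hp]; simp at hlen; omega)
        simpa using this
      rw [hraise]
      have hnum2 : p ++ [v + 1] = p ++ List.replicate 1 (v + 1) := by simp
      have hlt12 : lexLtB num (p ++ [v + 1]) = true := by
        rw [hnum_eq]
        exact lexLt_append_lt p v (v + 1) [] [] (by omega)
      have hle12 : lexLeB num (p ++ [v + 1]) = true := lexLtB_le _ _ hlt12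
      have hcount : (ndT 1 am.toNat M).countP (fun t => lexLeB (p ++ List.replicate 1 (v + 1)) t)
          < (ndT 1 am.toNat M).countP (fun t => lexLeB num t) := by
        apply countP_lt_of num _ _ ?_ ?_ (lexLeB_refl num) _ hnum_mem
        · intro t ht
          rw [← hnum2] at ht
          exact lexLeB_trans num _ t hle12 ht
        · rw [← hnum2]
          exact lexLtB_not_le num _ hlt12
      have hchain' : List.IsChain (· ≤ ·) (1 :: (p ++ List.replicate 1 (v + 1))) := by
        rw [← hnum2]
        exact chain_snoc_mono 1 v (v + 1) p (by omega) (by rw [← hnum_eq]; exact hch)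
      have hpbound : ∀ x ∈ p, x ≤ M - 1 := by
        intro x hx
        have : x ∈ num := by
          rw [hnum_eq]; exact List.mem_append_left _ hx
        have := hentry x this
        omega
      rw [hnum2, hnrcast]
      rw [ih p (v + 1) 1 _ (le_refl 1) (by simp [hp]; simp at hlen; omega) hchain'
        hpbound (by omega) (by omega)]
      have hsplit : (ndT 1 am.toNat M).filter (fun t => lexLeB num t && (sumPow r t == n))
          = (if (sumPow r num == n) then [num] else [])
            ++ (ndT 1 am.toNat M).filter
              (fun t => lexLeB (p ++ List.replicate 1 (v + 1)) t && (sumPow r t == n)) := by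
        apply filter_split num _ _ _ (by simp [lexLeB_refl]) ?_ _ hsorted hnum_mem ?_ ?_
        · rw [← hnum2]
          rw [lexLtB_not_le num _ hlt12]
          simp
        · intro t ht hne
          cases hsol : (sumPow r t == n) with
          | false => simp
          | true =>
            simp only [Bool.and_true]
            cases hle : lexLeB num t with
            | true =>
              cases hle2 : lexLeB (p ++ List.replicate 1 (v + 1)) t with
              | true => rfl
              | false =>
                exfalso
                rcases (mem_ndT am.toNat 1 M t).mp ht with ⟨htl, _, _⟩
                have := lexLe_succ_last p v t ?_ (by rw [← hnum_eq]; exact hle)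
                  (by rw [← hnum_eq]; exact hne)
                · rw [← hnum2] at hle2
                  rw [this] at hle2
                  exact absurd hle2 (by decide)
                · rw [htl, hamNat, hp]
                  simp
                  omega
            | false =>
              cases hle2 : lexLeB (p ++ List.replicate 1 (v + 1)) t with
              | false => rfl
              | true =>
                exfalso
                have : lexLeB num t = true := by
                  apply lexLeB_trans num _ t ?_ hle2
                  rw [← hnum2]; exact hle12
                rw [hle] at this; cases this
        · intro t ht hq'
          have hq'' : lexLeB (p ++ List.replicate 1 (v + 1)) t = true ∧ (sumPow r t == n) = true := by
            simpa using hq'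
          rcases hq'' with ⟨hle2, _⟩
          apply lexLt_of_lt_of_le num _ t ?_ hle2
          rw [← hnum2]; exact hlt12
      rw [hsplit]
      by_cases hn : sumPow r num = n
      · rw [if_pos hn, if_pos (by simpa using hn)]
        simp
      · rw [if_neg hn, if_neg (by simpa using hn)]
        simp

theorem revtaxi_eq_filter (n am r : Int) (hr : 1 ≤ r) (ham : 1 ≤ am) :
    revtaxi n am r
      = (ndT 1 am.toNat (max n 1 + 1)).filter (fun t => sumPow r t == n) := by
  set M := max n 1 + 1 with hM
  obtain ⟨m, hm⟩ : ∃ m, am.toNat = m + 1 := ⟨am.toNat - 1, by omega⟩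
  have hrep : List.replicate am.toNat (1 : Int)
      = List.replicate m 1 ++ List.replicate 1 1 := by
    rw [hm]
    simp [List.replicate_succ']
  have hnr : am - 1 = (((List.replicate m (1 : Int)).length : Nat) : Int) := by
    simp; omega
  unfold revtaxi
  rw [hrep, hnr]
  rw [loopA_eq n am r M hr hM (fuelA n am) (List.replicate m 1) 1 1 [] (le_refl 1)
    (by simp; omega)
    (by rw [← hrep]; exact chain_replicate 1 am.toNat)
    (by intro x hx; have := List.eq_of_mem_replicate hx; omega)
    (by omega)
    ?_]
  · rw [List.nil_append]
    apply List.filter_congr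
    intro t ht
    rcases (mem_ndT am.toNat 1 M t).mp ht with ⟨htl, htch, _⟩
    have : lexLeB (List.replicate m 1 ++ List.replicate 1 1) t = true := by
      rw [← hrep, ← htl]
      exact lexLe_replicate_of_chain t 1 htch
    rw [this, Bool.true_and]
  · calc (ndT 1 am.toNat M).countP (fun t => lexLeB (List.replicate m 1 ++ List.replicate 1 1) t) + 2
        ≤ (ndT 1 am.toNat M).length + 2 := by
          have := List.countP_le_length
            (p := fun t => lexLeB (List.replicate m 1 ++ List.replicate 1 1) t)
            (l := ndT 1 am.toNat M)
          omega
      _ ≤ ((M + 1 - 1).toNat) ^ am.toNat + 2 := by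
          have := ndT_length_le am.toNat 1 M
          omega
      _ ≤ fuelA n am := by
          unfold fuelA
          have : (M + 1 - 1).toNat = (max n 1).toNat + 1 := by omega
          rw [this]

-- ===== B side =====

theorem irootAux_spec (r m : Int) (hr : 1 ≤ r) : ∀ (d : Nat) (lo hi : Int), (hi - lo).toNat = d →
    0 ≤ lo → lo ≤ hi → ipow lo r ≤ m → (∀ s, 0 ≤ s → ipow s r ≤ m → s ≤ hi) →
    ipow (irootAux r m lo hi) r ≤ m ∧ 0 ≤ irootAux r m lo hi ∧
      ∀ s, 0 ≤ s → ipow s r ≤ m → s ≤ irootAux r m lo hi := by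
  intro d
  induction d using Nat.strong_induction_on with
  | _ d ih =>
    intro lo hi hd hlo hlohi hpowlo hupper
    rw [irootAux]
    by_cases h : lo < hi
    · rw [dif_pos h]
      have hfd : PySem.Int.floordiv (lo + hi + 1) 2 = (lo + hi + 1) / 2 :=
        PySem.Int.floordiv_eq_ediv_of_pos (by omega)
      have hmid1 : lo < PySem.Int.floordiv (lo + hi + 1) 2 := by rw [hfd]; omega
      have hmid2 : PySem.Int.floordiv (lo + hi + 1) 2 ≤ hi := by rw [hfd]; omega
      by_cases hpow : ipow (PySem.Int.floordiv (lo + hi + 1) 2) r ≤ m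
      · rw [if_pos hpow]
        exact ih (hi - PySem.Int.floordiv (lo + hi + 1) 2).toNat (by omega)
          (PySem.Int.floordiv (lo + hi + 1) 2) hi rfl (by omega) hmid2 hpow hupper
      · rw [if_neg hpow]
        refine ih (PySem.Int.floordiv (lo + hi + 1) 2 - 1 - lo).toNat (by omega) lo
          (PySem.Int.floordiv (lo + hi + 1) 2 - 1) rfl hlo (by omega) hpowlo ?_
        intro s hs hsp
        by_contra hc
        have hsm : PySem.Int.floordiv (lo + hi + 1) 2 ≤ s := by omega
        have := ipow_le_ipow (PySem.Int.floordiv (lo + hi + 1) 2) s r (by omega) hsm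
        omega
    · rw [dif_neg h]
      have : hi = lo := by omega
      exact ⟨hpowlo, hlo, fun s hs hsp => by have := hupper s hs hsp; omega⟩

theorem iroot_spec (r m : Int) (hr : 1 ≤ r) (hm : 0 ≤ m) :
    ipow (iroot r m) r ≤ m ∧ 0 ≤ iroot r m ∧
      ∀ s, 0 ≤ s → ipow s r ≤ m → s ≤ iroot r m := by
  apply irootAux_spec r m hr (m - 0).toNat 0 m rfl (le_refl 0) hm
  · have : ipow 0 r = 0 := by
      unfold ipow
      exact zero_pow (by omega)
    omega
  · intro s hs hsp
    rcases eq_or_lt_of_le hs with rfl | hs1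
    · omega
    · have := self_le_ipow s r (by omega) hr
      omega

theorem filter_unique (p : Int → Bool) : ∀ (l : List Int) (t : Int), l.Nodup → t ∈ l →
    p t = true → (∀ x ∈ l, p x = true → x = t) → l.filter p = [t] := by
  intro l
  induction l with
  | nil => intro t _ hm; simp at hm
  | cons h tl ih =>
    intro t hnd hm hp huniq
    rcases List.nodup_cons.mp hnd with ⟨hh, htl⟩
    by_cases heq : h = t
    · subst heq
      rw [List.filter_cons, if_pos hp]
      have : tl.filter p = [] := by
        rw [List.filter_eq_nil_iff]
        intro x hx hpx
        have := huniq x (by simp [hx]) hpx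
        subst this
        exact hh hx
      rw [this]
    · have hm' : t ∈ tl := by
        rcases List.mem_cons.mp hm with h' | h'
        · exact absurd h'.symm heq
        · exact h'
      have hph : p h = false := by
        by_contra hc
        have hc' : p h = true := by revert hc; cases p h <;> simp
        exact heq (huniq h (by simp) hc')
      rw [List.filter_cons, hph]
      simp only [Bool.false_eq_true, if_false]
      exact ih t htl hm' hp (fun x hx hpx => huniq x (by simp [hx]) hpx)

theorem sumPow_singleton (r b : Int) : sumPow r [b] = ipow b r := by simp [sumPow]

theorem dfsB_one (r : Int) (hr : 1 ≤ r) (pre : List Int) (lo rem H : Int)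
    (hlo : 1 ≤ lo) (hH : rem ≤ H) :
    dfsB r 1 pre lo rem
      = ((ndT lo 1 H).filter (fun t => sumPow r t == rem)).map (fun t => pre ++ t) := by
  have hndT : ndT lo 1 H = (PySem.List.pyRange lo (H + 1) 1).map (fun b => [b]) := by
    simp only [ndT, List.map_eq_flatMap]
    apply List.flatMap_congr
    intro x _
    rfl
  rw [hndT, List.filter_map]
  have hpred : ((fun t => sumPow r t == rem) ∘ (fun b => [b])) = (fun b => ipow b r == rem) := by
    funext b
    simp [sumPow_singleton]
  rw [hpred]
  show dfsB r 1 pre lo rem = _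
  by_cases hrem : 1 ≤ rem
  · obtain ⟨hr1, hr0, hrmax⟩ := iroot_spec r rem hr (by omega)
    have hroot_pos : ∀ s, 0 ≤ s → ipow s r = rem → 1 ≤ s := by
      intro s hs hsp
      rcases eq_or_lt_of_le hs with rfl | h1
      · exfalso
        have : ipow 0 r = 0 := zero_pow (by omega : r.toNat ≠ 0)
        omega
      · omega
    have huniq : ∀ x, lo ≤ x → ipow x r = rem → x = iroot r rem := by
      intro x hx hxp
      have hxle : x ≤ iroot r rem := hrmax x (by omega) (le_of_eq hxp)
      rcases eq_or_lt_of_le hxle with h | h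
      · exact h
      · exfalso
        have := ipow_lt_ipow x (iroot r rem) r (by omega) h hr
        omega
    simp only [dfsB, if_pos hrem]
    by_cases hcond : lo ≤ iroot r rem ∧ ipow (iroot r rem) r = rem
    · rw [if_pos hcond]
      have hfil : (PySem.List.pyRange lo (H + 1) 1).filter (fun b => ipow b r == rem)
          = [iroot r rem] := by
        apply filter_unique _ _ _ (PySem.List.nodup_pyRange_one _ _)
        · apply PySem.List.mem_pyRange_one.mpr
          constructor
          · exact hcond.1
          · have h1 : 1 ≤ iroot r rem := hroot_pos _ hr0 hcond.2
            have := self_le_ipow (iroot r rem) r h1 hr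
            omega
        · simp [hcond.2]
        · intro x hx hpx
          rcases PySem.List.mem_pyRange_one.mp hx with ⟨hx1, _⟩
          exact huniq x hx1 (by simpa using hpx)
      rw [hfil]
      simp
    · rw [if_neg hcond]
      have hfil : (PySem.List.pyRange lo (H + 1) 1).filter (fun b => ipow b r == rem) = [] := by
        rw [List.filter_eq_nil_iff]
        intro b hb hpb
        rcases PySem.List.mem_pyRange_one.mp hb with ⟨hb1, _⟩
        have hbp : ipow b r = rem := by simpa using hpb
        have := huniq b hb1 hbp
        subst this
        exact hcond ⟨hb1, hbp⟩
      rw [hfil]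
      simp
  · simp only [dfsB, if_neg hrem]
    have hfil : (PySem.List.pyRange lo (H + 1) 1).filter (fun b => ipow b r == rem) = [] := by
      rw [List.filter_eq_nil_iff]
      intro b hb hpb
      rcases PySem.List.mem_pyRange_one.mp hb with ⟨hb1, _⟩
      have : 1 ≤ ipow b r := one_le_ipow b r (by omega)
      have hbp : ipow b r = rem := by simpa using hpb
      omega
    rw [hfil]
    simp

theorem sumPow_cons (r b : Int) (t : List Int) : sumPow r (b :: t) = ipow b r + sumPow r t := by
  simp [sumPow]

theorem dfsB_eq (r : Int) (hr : 1 ≤ r) : ∀ (k : Nat) (pre : List Int) (lo rem H : Int),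
    1 ≤ lo → rem ≤ H →
    dfsB r (k + 1) pre lo rem
      = ((ndT lo (k + 1) H).filter (fun t => sumPow r t == rem)).map (fun t => pre ++ t) := by
  intro k
  induction k with
  | zero => exact fun pre lo rem H h1 h2 => dfsB_one r hr pre lo rem H h1 h2
  | succ k ih =>
    intro pre lo rem H hlo hH
    have hempty : ∀ b : Int, 1 ≤ b → rem < ((k : Int) + 2) * ipow b r →
        (ndT b (k + 1) H).filter (fun t => sumPow r t == rem - ipow b r) = [] := by
      intro b hb hbig
      rw [List.filter_eq_nil_iff]
      intro t ht hp
      rcases (mem_ndT (k + 1) b H t).mp ht with ⟨htl, htch, _⟩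
      have hmul : (t.length : Int) * ipow b r ≤ sumPow r t :=
        sumPow_ge_len_mul r t b (by omega) (chain_le_of_chain t b htch)
      rw [htl] at hmul
      have hcast : (((k + 1 : Nat)) : Int) = (k : Int) + 1 := by push_cast; ring
      rw [hcast] at hmul
      have hp' : sumPow r t = rem - ipow b r := by simpa using hp
      have e1 : ((k : Int) + 2) * ipow b r = ((k : Int) + 1) * ipow b r + ipow b r := by ring
      omega
    have hG : ((ndT lo (k + 2) H).filter (fun t => sumPow r t == rem)).map (fun t => pre ++ t)
        = (PySem.List.pyRange lo (H + 1) 1).flatMap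
            (fun b => ((ndT b (k + 1) H).filter (fun t => sumPow r t == rem - ipow b r)).map
              (fun t => (pre ++ [b]) ++ t)) := by
      rw [show ndT lo (k + 2) H = (PySem.List.pyRange lo (H + 1) 1).flatMap
            (fun b => (ndT b (k + 1) H).map (fun t => b :: t)) from rfl]
      rw [List.filter_flatMap, List.map_flatMap]
      apply List.flatMap_congr
      intro b _
      rw [List.filter_map, List.map_map]
      have hpredeq : ∀ t : List Int,
          ((fun t => sumPow r t == rem) ∘ fun t => b :: t) t
            = (fun t => sumPow r t == rem - ipow b r) t := by
        intro t
        simp only [Function.comp_apply, sumPow_cons]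
        apply Bool.eq_iff_iff.mpr
        simp only [beq_iff_eq]
        omega
      rw [List.filter_congr (fun t _ => hpredeq t)]
      apply List.map_congr_left
      intro t _
      simp
    show dfsB r (k + 2) pre lo rem = _
    rw [hG]
    by_cases hrem2 : rem < (k : Int) + 2
    · rw [show dfsB r (k + 2) pre lo rem = [] from by
        rw [dfsB]
        rw [if_pos (by push_cast; omega)]]
      symm
      rw [List.flatMap_eq_nil_iff]
      intro b hb
      rcases PySem.List.mem_pyRange_one.mp hb with ⟨hb1, _⟩
      have hip : 1 ≤ ipow b r := one_le_ipow b r (by omega)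
      have : ((k : Int) + 2) * 1 ≤ ((k : Int) + 2) * ipow b r :=
        mul_le_mul_of_nonneg_left hip (by omega)
      rw [hempty b (by omega) (by omega)]
      simp
    · have hrem0 : 0 ≤ rem := by omega
      have hfd : PySem.Int.floordiv rem ((k : Int) + 2) = rem / ((k : Int) + 2) :=
        PySem.Int.floordiv_eq_ediv_of_pos (by omega)
      have hm0 : 0 ≤ PySem.Int.floordiv rem ((k : Int) + 2) := by
        rw [hfd]
        exact Int.ediv_nonneg hrem0 (by omega)
      obtain ⟨hb1, hb0, hbmax⟩ := iroot_spec r (PySem.Int.floordiv rem ((k : Int) + 2)) hr hm0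
      set bhi := iroot r (PySem.Int.floordiv rem ((k : Int) + 2)) with hbhi
      have hbr : ∀ q : Int, q ≤ PySem.Int.floordiv rem ((k : Int) + 2) ↔ q * ((k : Int) + 2) ≤ rem := by
        intro q
        exact PySem.Int.le_floordiv_iff_mul_le (by omega)
      have hgt_empty : ∀ b : Int, 1 ≤ b → bhi < b →
          (ndT b (k + 1) H).filter (fun t => sumPow r t == rem - ipow b r) = [] := by
        intro b hb hgt
        apply hempty b hb
        have hnle : ¬ (ipow b r ≤ PySem.Int.floordiv rem ((k : Int) + 2)) := by
          intro hc
          have := hbmax b (by omega) hc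
          omega
        have := (hbr (ipow b r)).not.mp hnle
        have h2 : ¬ (ipow b r * ((k : Int) + 2) ≤ rem) := this
        nlinarith [h2]
      have hLHS : dfsB r (k + 2) pre lo rem
          = (PySem.List.pyRange lo (bhi + 1) 1).flatMap
              (fun b => dfsB r (k + 1) (pre ++ [b]) b (rem - ipow b r)) := by
        rw [dfsB]
        rw [if_neg (by push_cast; omega)]
      rw [hLHS]
      have hcongr : (PySem.List.pyRange lo (bhi + 1) 1).flatMap
            (fun b => dfsB r (k + 1) (pre ++ [b]) b (rem - ipow b r))
          = (PySem.List.pyRange lo (bhi + 1) 1).flatMap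
            (fun b => ((ndT b (k + 1) H).filter (fun t => sumPow r t == rem - ipow b r)).map
              (fun t => (pre ++ [b]) ++ t)) := by
        apply List.flatMap_congr
        intro b hb
        rcases PySem.List.mem_pyRange_one.mp hb with ⟨hb1, _⟩
        have hip : 1 ≤ ipow b r := one_le_ipow b r (by omega)
        exact ih (pre ++ [b]) b (rem - ipow b r) H (by omega) (by omega)
      rw [hcongr]
      by_cases hbl : bhi < lo
      · rw [PySem.List.pyRange_one_eq_nil (by omega : bhi + 1 ≤ lo)]
        simp only [List.flatMap_nil]
        symm
        rw [List.flatMap_eq_nil_iff]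
        intro b hb
        rcases PySem.List.mem_pyRange_one.mp hb with ⟨hb1, _⟩
        rw [hgt_empty b (by omega) (by omega)]
        simp
      · have hbhi1 : 1 ≤ bhi := by omega
        have hbH : bhi ≤ H := by
          have h1 := self_le_ipow bhi r hbhi1 hr
          have h2 : PySem.Int.floordiv rem ((k : Int) + 2) ≤ rem := by
            rw [hfd]
            exact Int.ediv_le_self _ hrem0
          omega
        rw [PySem.List.pyRange_one_append lo (bhi + 1) (H + 1) (by omega) (by omega)]
        rw [List.flatMap_append]
        have hjunk : (PySem.List.pyRange (bhi + 1) (H + 1) 1).flatMap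
            (fun b => ((ndT b (k + 1) H).filter (fun t => sumPow r t == rem - ipow b r)).map
              (fun t => (pre ++ [b]) ++ t)) = [] := by
          rw [List.flatMap_eq_nil_iff]
          intro b hb
          rcases PySem.List.mem_pyRange_one.mp hb with ⟨hb1, _⟩
          rw [hgt_empty b (by omega) (by omega)]
          simp
        rw [hjunk, List.append_nil]

theorem alt_eq_filter (n am r : Int) (hr : 1 ≤ r) (ham : 1 ≤ am) :
    revtaxi_alt n am r
      = (ndT 1 am.toNat (max n 1 + 1)).filter (fun t => sumPow r t == n) := by
  unfold revtaxi_alt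
  rw [if_neg (by omega)]
  obtain ⟨k, hk⟩ : ∃ k, am.toNat = k + 1 := ⟨am.toNat - 1, by omega⟩
  rw [hk]
  rw [dfsB_eq r hr k [] 1 n (max n 1 + 1) (le_refl 1) (by omega)]
  simp

theorem revtaxi_main (n am r : Int) (hr : 1 ≤ r) : revtaxi n am r = revtaxi_alt n am r := by
  by_cases ham : am < 1
  · unfold revtaxi revtaxi_alt
    rw [if_pos ham]
    have h0 : am.toNat = 0 := by omega
    rw [h0]
    obtain ⟨f, hf⟩ : ∃ f, fuelA n am = f + 1 := ⟨fuelA n am - 1, by unfold fuelA; omega⟩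
    rw [hf]
    simp only [loopA, List.replicate_zero]
    rw [if_neg (by omega)]
  · have h1 : 1 ≤ am := by omega
    rw [revtaxi_eq_filter n am r hr h1, alt_eq_filter n am r hr h1]

-- ===== VERDICT =====
theorem revtaxi_spec : Claim_equal_revtaxi := by
  intro n am r _ hpre
  unfold Spec_revtaxi
  exact revtaxi_main n am r hpre
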